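-- pv_equiv track=rewrite | github.com/yasufumi-nakata/Pytra | src/toolchain/resolve/py/resolver.py | _resolve_alias_direct_deps
-- ===== SOURCE A (Python) =====
-- def _resolve_alias_direct_deps(type_text: str, alias_names: set[str]) -> list[str]:
--     deps: list[str] = []
--     token = ""
--     for ch in type_text:
--         if ch.isalnum() or ch == "_" or ch == ".":
--             token += ch
--             continue
--         if token != "":
--             if token in alias_names and token not in deps:
--                 deps.append(token)
--             token = ""
--     if token != "" and token in alias_names and token not in deps:
--         deps.append(token)
--     return deps
-- ===== SOURCE B (Python) =====
-- def _resolve_alias_direct_deps(type_text: str, alias_names: set[str]) -> list[str]: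
--     # Phase 1: tokenize by mapping every non-token character to a space and splitting.
--     tokens = "".join(c if (c.isalnum() or c == "_" or c == ".") else " " for c in type_text).split()
--     # Phase 2: keep alias tokens, deduped in first-occurrence order.
--     deps: list[str] = []
--     for tok in tokens:
--         if tok in alias_names and tok not in deps:
--             deps.append(tok)
--     return deps
-- ===== Notes on version B (the rewrite author's own statement) =====
-- stated objective: alternative
-- what changed: B separates tokenization from filtering: it first builds the full token list by mapping every non-token character to a space and splitting on whitespace, then makes one pass over the tokens appending each alias token not yet collected, instead of A's single character loop that interleaves token accumulation with the membership/dedup test.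
import Mathlib
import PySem

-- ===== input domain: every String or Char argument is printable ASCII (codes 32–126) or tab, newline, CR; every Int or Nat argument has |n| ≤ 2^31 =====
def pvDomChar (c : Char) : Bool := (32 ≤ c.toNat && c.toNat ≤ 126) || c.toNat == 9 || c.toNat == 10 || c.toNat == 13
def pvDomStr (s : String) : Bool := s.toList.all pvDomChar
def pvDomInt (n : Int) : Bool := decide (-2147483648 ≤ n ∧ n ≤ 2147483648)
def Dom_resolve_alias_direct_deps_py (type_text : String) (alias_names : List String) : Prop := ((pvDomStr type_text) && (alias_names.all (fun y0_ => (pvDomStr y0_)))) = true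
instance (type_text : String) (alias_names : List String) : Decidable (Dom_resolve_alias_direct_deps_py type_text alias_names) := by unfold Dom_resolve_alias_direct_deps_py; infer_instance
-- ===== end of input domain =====

-- B re-implements A by a different decomposition (tokenize via map-to-space + split, then one
-- filtering pass) instead of A's single interleaved character loop; same result on all inputs.

-- the character test both Pythons use: ch.isalnum() or ch == "_" or ch == "."
def pvTokChar (c : Char) : Bool := PySem.Chars.isalnum c || c == '_' || c == '.'

-- ===== PORT A =====
-- A's character loop; the accumulated token is kept as List Char (Python's token += ch).
def pvALoop (alias_names : List String) : List Char → List String → List Char → List String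
  | [], deps, token =>
      if token ≠ [] ∧ String.ofList token ∈ alias_names ∧ String.ofList token ∉ deps then
        deps ++ [String.ofList token]
      else deps
  | c :: rest, deps, token =>
      if pvTokChar c then
        pvALoop alias_names rest deps (token ++ [c])
      else
        if token ≠ [] then
          if String.ofList token ∈ alias_names ∧ String.ofList token ∉ deps then
            pvALoop alias_names rest (deps ++ [String.ofList token]) []
          else
            pvALoop alias_names rest deps []
        else
          pvALoop alias_names rest deps []

def resolve_alias_direct_deps_py (type_text : String) (alias_names : List String) : List String :=
  pvALoop alias_names type_text.toList [] []

-- ===== PORT B =====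
def resolve_alias_direct_deps_py_alt (type_text : String) (alias_names : List String) : List String :=
  let tokens := PySem.Str.split₀ (String.ofList (type_text.toList.map (fun c => if pvTokChar c then c else ' ')))
  tokens.foldl (fun deps tok => if tok ∈ alias_names ∧ tok ∉ deps then deps ++ [tok] else deps) []

-- ===== PRECONDITION & SPEC =====
def Spec_resolve_alias_direct_deps_py (type_text : String) (alias_names : List String) (out : List String) : Prop := out = resolve_alias_direct_deps_py_alt type_text alias_names
instance (type_text : String) (alias_names : List String) (out : List String) : Decidable (Spec_resolve_alias_direct_deps_py type_text alias_names out) := by unfold Spec_resolve_alias_direct_deps_py; infer_instance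

-- ===== CLAIM (what is proved, stated in full; the proofs are below) =====
def Claim_equal_resolve_alias_direct_deps_py : Prop := ∀ (type_text : String) (alias_names : List String), Dom_resolve_alias_direct_deps_py type_text alias_names → Spec_resolve_alias_direct_deps_py type_text alias_names (resolve_alias_direct_deps_py type_text alias_names)

-- ===== LEMMAS AND PROOFS =====

-- token characters are never whitespace
theorem pvTokChar_not_isspace (c : Char) (h : pvTokChar c = true) : PySem.Chars.isspace c = false := by
  have e1 : 'A'.val.toNat = 65 := rfl
  have e2 : 'Z'.val.toNat = 90 := rfl
  have e3 : 'a'.val.toNat = 97 := rfl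
  have e4 : 'z'.val.toNat = 122 := rfl
  have e5 : '0'.val.toNat = 48 := rfl
  have e6 : '9'.val.toNat = 57 := rfl
  have e7 : '_'.val.toNat = 95 := rfl
  have e8 : '.'.val.toNat = 46 := rfl
  unfold pvTokChar at h
  simp only [PySem.Chars.isalnum, PySem.Chars.isalpha, PySem.Chars.isdigit, PySem.Chars.isupper,
    PySem.Chars.islower, PySem.Chars.isspace, Bool.or_eq_true, Bool.and_eq_true, decide_eq_true_eq,
    beq_iff_eq, Char.le_def, Char.ext_iff, UInt32.le_iff_toNat_le, ← UInt32.toNat_inj,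
    Bool.or_eq_false_iff, Bool.and_eq_false_iff, decide_eq_false_iff_not, not_le,
    Char.toNat, e1, e2, e3, e4, e5, e6, e7, e8] at *
  omega

-- the token list A's loop implicitly walks through
def pvTokens : List Char → List Char → List (List Char)
  | [], token => if token = [] then [] else [token]
  | c :: rest, token =>
      if pvTokChar c then pvTokens rest (token ++ [c])
      else if token = [] then pvTokens rest [] else token :: pvTokens rest []

theorem pv_go_eq_tokens (cs token : List Char) (acc : List (List Char)) :
    PySem.Chars.split₀.go (cs.map (fun c => if pvTokChar c then c else ' ')) token.reverse acc
      = acc.reverse ++ pvTokens cs token := by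
  induction cs generalizing token acc with
  | nil =>
      simp only [List.map_nil, PySem.Chars.split₀.go, pvTokens]
      by_cases h : token = [] <;> simp [h]
  | cons c rest ih =>
      by_cases h : pvTokChar c = true
      · have hs := pvTokChar_not_isspace c h
        have hrev : c :: token.reverse = (token ++ [c]).reverse := by simp
        simp only [List.map_cons, h, ite_true, PySem.Chars.split₀.go, hs, Bool.false_eq_true,
          if_false, pvTokens, hrev, ih]
      · have hc : (if pvTokChar c then c else ' ') = ' ' := by simp [h]
        have hs : PySem.Chars.isspace ' ' = true := by decide
        simp only [List.map_cons, PySem.Chars.split₀.go, hs, ite_true, pvTokens, h,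
          Bool.false_eq_true, if_false]
        by_cases ht : token = []
        · simp only [ht, List.reverse_nil, List.isEmpty_nil, ite_true]
          have := ih ([] : List Char) acc
          simpa using this
        · have hne : token.reverse.isEmpty = false := by
            simp [List.isEmpty_eq_false_iff, ht]
          simp only [hne, Bool.false_eq_true, if_false, if_neg ht, List.reverse_reverse]
          have := ih ([] : List Char) (token :: acc)
          simpa using this

-- A's loop is the filtering fold over pvTokens
theorem pv_aLoop_eq_fold (alias_names : List String) (cs token : List Char) (deps : List String) :
    pvALoop alias_names cs deps token
      = (pvTokens cs token).foldl
          (fun deps t => if String.ofList t ∈ alias_names ∧ String.ofList t ∉ deps then deps ++ [String.ofList t] else deps)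
          deps := by
  induction cs generalizing token deps with
  | nil =>
      simp only [pvALoop, pvTokens]
      by_cases ht : token = []
      · simp [ht]
      · by_cases hm : String.ofList token ∈ alias_names ∧ String.ofList token ∉ deps
        · simp [ht, hm]
        · simp [ht, hm]
  | cons c rest ih =>
      by_cases h : pvTokChar c = true
      · simp only [pvALoop, pvTokens, h, ite_true, ih]
      · simp only [pvALoop, pvTokens, h, Bool.false_eq_true, if_false]
        by_cases ht : token = []
        · simp [ht, ih]
        · by_cases hm : String.ofList token ∈ alias_names ∧ String.ofList token ∉ deps
          · simp [ht, hm, ih]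
          · simp [ht, hm, ih]

-- ===== VERDICT (by name: the statement is the Claim_ definition above) =====
theorem resolve_alias_direct_deps_py_spec : Claim_equal_resolve_alias_direct_deps_py := by
  intro type_text alias_names _
  unfold Spec_resolve_alias_direct_deps_py resolve_alias_direct_deps_py resolve_alias_direct_deps_py_alt
  have hsplit : PySem.Chars.split₀ (type_text.toList.map (fun c => if pvTokChar c then c else ' '))
      = pvTokens type_text.toList [] := by
    have := pv_go_eq_tokens type_text.toList [] []
    simpa [PySem.Chars.split₀] using this
  have hmk : (String.ofList (type_text.toList.map (fun c => if pvTokChar c then c else ' '))).toList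
      = type_text.toList.map (fun c => if pvTokChar c then c else ' ') := by simp
  simp only [PySem.Str.split₀, hmk, hsplit, List.foldl_map, pv_aLoop_eq_fold]
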